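-- pv_equiv track=rewrite | github.com/Cooke64/DataStructureAndAlgorithms | YandexTasks/good_strings.py | f
-- ===== SOURCE A (Python) =====
-- def f(s: str):
--     len_s = len(s)
--     left = right = res = [0] * len_s
--
--     for i in range(len_s - 1):
--         if s[i] == s[i+1]:
--             continue
--         if s[i].lower() == s[i + 1].lower():
--             left[i] = 1
--
--     for i in range((len_s - 1), 0, -1):
--         if s[i] == s[i-1]:
--             continue
--         if s[i].lower() == s[i - 1].lower():
--             right[i] = 1
--
--     for i in range(len_s):
--         res[i] = max(left[i], right[i])
--
--     total = []
--     for i in range(len_s):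
--         if not res[i]:
--             total.append(s[i])
--
--     return ''.join(total)
-- ===== SOURCE B (Python) =====
-- def f(s: str):
--     n = len(s)
--     out = []
--     for i in range(n):
--         c = s[i]
--         drop = False
--         for j in (i - 1, i + 1):
--             if 0 <= j < n and s[j] != c and s[j].lower() == c.lower():
--                 drop = True
--         if not drop:
--             out.append(c)
--     return ''.join(out)
-- ===== Notes on version B (the rewrite author's own statement) =====
-- stated objective: simpler
-- what changed: B replaces A's four passes (two directional mark-table fills over an aliased list, a max pass, a filter pass) with one direct loop that inspects each character's two neighbors and builds the output immediately.
import Mathlib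
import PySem

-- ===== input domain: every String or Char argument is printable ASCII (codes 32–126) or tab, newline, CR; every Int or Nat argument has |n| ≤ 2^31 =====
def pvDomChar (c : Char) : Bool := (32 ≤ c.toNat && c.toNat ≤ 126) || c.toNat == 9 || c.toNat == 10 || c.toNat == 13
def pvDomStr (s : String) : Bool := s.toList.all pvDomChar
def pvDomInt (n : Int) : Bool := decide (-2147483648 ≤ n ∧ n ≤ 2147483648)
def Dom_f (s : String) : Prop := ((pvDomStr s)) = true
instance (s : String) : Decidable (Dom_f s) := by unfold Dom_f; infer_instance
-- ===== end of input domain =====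

-- B drops each char by inspecting its two neighbors directly in one pass, instead of A's
-- two directional mark-table passes followed by a max pass and a filter pass (simpler decomposition).

-- ===== PORT A =====
-- NOTE: in the Python, `left = right = res = [0] * len_s` binds THREE NAMES TO ONE LIST;
-- the port models that single shared list as arr0/arr1/arr2/arr3 threaded through the four loops.
-- All indexing in A is in range, so pyGetD's defaults ' ' / 0 are never read.
def f (s : String) : String :=
  let l := s.toList
  let lenS : Int := (l.length : Int)
  let arr0 : List Int := List.replicate l.length 0
  let arr1 := (PySem.List.pyRange 0 (lenS - 1) 1).foldl (fun arr i =>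
      if PySem.List.pyGetD l i ' ' = PySem.List.pyGetD l (i + 1) ' ' then arr
      else if PySem.Chars.lowerChar (PySem.List.pyGetD l i ' ')
              = PySem.Chars.lowerChar (PySem.List.pyGetD l (i + 1) ' ') then
        arr.set i.toNat 1
      else arr) arr0
  let arr2 := (PySem.List.pyRange (lenS - 1) 0 (-1)).foldl (fun arr i =>
      if PySem.List.pyGetD l i ' ' = PySem.List.pyGetD l (i - 1) ' ' then arr
      else if PySem.Chars.lowerChar (PySem.List.pyGetD l i ' ')
              = PySem.Chars.lowerChar (PySem.List.pyGetD l (i - 1) ' ') then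
        arr.set i.toNat 1
      else arr) arr1
  let arr3 := (PySem.List.pyRange 0 lenS 1).foldl (fun arr i =>
      arr.set i.toNat (max (PySem.List.pyGetD arr i 0) (PySem.List.pyGetD arr i 0))) arr2
  let total := (PySem.List.pyRange 0 lenS 1).foldl (fun (t : List Char) i =>
      if PySem.List.pyGetD arr3 i 0 = 0 then t ++ [PySem.List.pyGetD l i ' '] else t) []
  String.ofList total

-- ===== PORT B =====
def f_alt (s : String) : String :=
  let l := s.toList
  let n : Int := (l.length : Int)
  let out := (PySem.List.pyRange 0 n 1).foldl (fun (out : List Char) i =>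
      let c := PySem.List.pyGetD l i ' '
      let drop := [i - 1, i + 1].foldl (fun drop j =>
        if 0 ≤ j ∧ j < n ∧ PySem.List.pyGetD l j ' ' ≠ c ∧
            PySem.Chars.lowerChar (PySem.List.pyGetD l j ' ') = PySem.Chars.lowerChar c then
          true
        else drop) false
      if !drop then out ++ [c] else out) []
  String.ofList out

-- ===== PRECONDITION & SPEC =====
def Spec_f (s : String) (out : String) : Prop := out = f_alt s
instance (s : String) (out : String) : Decidable (Spec_f s out) := by unfold Spec_f; infer_instance

-- ===== CLAIM =====
def Claim_equal_f : Prop := ∀ (s : String), Dom_f s → Spec_f s (f s)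

-- ===== LEMMAS AND PROOFS =====

-- A's mark table (the shared list) after the first three loops, as a standalone expression.
def tableA (l : List Char) : List Int :=
  (PySem.List.pyRange 0 ((l.length : Int)) 1).foldl (fun arr i =>
      arr.set i.toNat (max (PySem.List.pyGetD arr i 0) (PySem.List.pyGetD arr i 0)))
    ((PySem.List.pyRange ((l.length : Int) - 1) 0 (-1)).foldl (fun arr i =>
        if PySem.List.pyGetD l i ' ' = PySem.List.pyGetD l (i - 1) ' ' then arr
        else if PySem.Chars.lowerChar (PySem.List.pyGetD l i ' ')
                = PySem.Chars.lowerChar (PySem.List.pyGetD l (i - 1) ' ') then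
          arr.set i.toNat 1
        else arr)
      ((PySem.List.pyRange 0 ((l.length : Int) - 1) 1).foldl (fun arr i =>
          if PySem.List.pyGetD l i ' ' = PySem.List.pyGetD l (i + 1) ' ' then arr
          else if PySem.Chars.lowerChar (PySem.List.pyGetD l i ' ')
                  = PySem.Chars.lowerChar (PySem.List.pyGetD l (i + 1) ' ') then
            arr.set i.toNat 1
          else arr)
        (List.replicate l.length (0 : Int))))

theorem length_fold_mark (e d : Int → Prop) [DecidablePred e] [DecidablePred d]
    (idxs : List Int) (arr : List Int) :
    (idxs.foldl (fun a i => if e i then a else if d i then a.set i.toNat 1 else a) arr).length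
      = arr.length := by
  induction idxs generalizing arr with
  | nil => rfl
  | cons i idxs ih =>
    simp only [List.foldl_cons]
    rw [ih]
    split_ifs <;> simp

theorem getD_fold_mark (e d : Int → Prop) [DecidablePred e] [DecidablePred d]
    (idxs : List Int) (arr : List Int) (hnd : idxs.Nodup)
    (hb : ∀ i ∈ idxs, 0 ≤ i ∧ i.toNat < arr.length) (j : Nat) :
    (idxs.foldl (fun a i => if e i then a else if d i then a.set i.toNat 1 else a) arr).getD j 0
      = if ((j : Int) ∈ idxs ∧ ¬ e (j : Int) ∧ d (j : Int)) then 1 else arr.getD j 0 := by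
  induction idxs generalizing arr with
  | nil => simp
  | cons i idxs ih =>
    simp only [List.foldl_cons]
    have hi := hb i (List.mem_cons_self ..)
    have hlen : (if e i then arr else if d i then arr.set i.toNat 1 else arr).length
        = arr.length := by split_ifs <;> simp
    rw [ih _ (hnd.of_cons) (by intro x hx; rw [hlen]; exact hb x (List.mem_cons_of_mem _ hx))]
    by_cases hji : (j : Int) = i
    · have hjn : (j : Int) ∉ idxs := by
        rw [hji]; exact (List.nodup_cons.mp hnd).1
      have hjt : i.toNat = j := by omega
      simp only [hji, List.mem_cons]
      split_ifs with h1 h2 h3 <;> simp_all [List.getD_eq_getElem?_getD]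
    · have hne : i.toNat ≠ j := by omega
      have hset : (arr.set i.toNat 1).getD j 0 = arr.getD j 0 := by
        simp [List.getD_eq_getElem?_getD, List.getElem?_set_ne hne]
      simp only [List.mem_cons, hji, false_or]
      split_ifs <;> simp_all

theorem fold_max_id (idxs : List Int) (arr : List Int)
    (hb : ∀ i ∈ idxs, 0 ≤ i ∧ i.toNat < arr.length) :
    idxs.foldl (fun a i => a.set i.toNat (max (PySem.List.pyGetD a i 0) (PySem.List.pyGetD a i 0)))
      arr = arr := by
  induction idxs generalizing arr with
  | nil => rfl
  | cons i idxs ih =>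
    have hi := hb i (List.mem_cons_self ..)
    have hstep : arr.set i.toNat
        (max (PySem.List.pyGetD arr i 0) (PySem.List.pyGetD arr i 0)) = arr := by
      rw [PySem.List.pyGetD_eq_getElem arr 0 hi.1 (by omega)]
      simp
    simp only [List.foldl_cons]
    rw [hstep]
    exact ih arr (fun x hx => hb x (List.mem_cons_of_mem _ hx))

theorem ite_ite_or (A B : Prop) [Decidable A] [Decidable B] :
    (if A then (1 : Int) else if B then 1 else 0) = if (A ∨ B) then 1 else 0 := by
  by_cases hA : A <;> by_cases hB : B <;> simp [hA, hB]

theorem tableA_getD (l : List Char) (j : Nat) (hj : j < l.length) :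
    (tableA l).getD j 0 =
      if (((j : Int) ∈ PySem.List.pyRange ((l.length : Int) - 1) 0 (-1)
            ∧ ¬ (PySem.List.pyGetD l (j : Int) ' ' = PySem.List.pyGetD l ((j : Int) - 1) ' ')
            ∧ PySem.Chars.lowerChar (PySem.List.pyGetD l (j : Int) ' ')
                = PySem.Chars.lowerChar (PySem.List.pyGetD l ((j : Int) - 1) ' '))
          ∨ ((j : Int) ∈ PySem.List.pyRange 0 ((l.length : Int) - 1) 1
            ∧ ¬ (PySem.List.pyGetD l (j : Int) ' ' = PySem.List.pyGetD l ((j : Int) + 1) ' ')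
            ∧ PySem.Chars.lowerChar (PySem.List.pyGetD l (j : Int) ' ')
                = PySem.Chars.lowerChar (PySem.List.pyGetD l ((j : Int) + 1) ' '))) then 1
      else 0 := by
  unfold tableA
  have hlen1 := length_fold_mark
    (fun i => PySem.List.pyGetD l i ' ' = PySem.List.pyGetD l (i + 1) ' ')
    (fun i => PySem.Chars.lowerChar (PySem.List.pyGetD l i ' ')
        = PySem.Chars.lowerChar (PySem.List.pyGetD l (i + 1) ' '))
    (PySem.List.pyRange 0 ((l.length : Int) - 1) 1) (List.replicate l.length (0 : Int))
  have hb1 : ∀ i ∈ PySem.List.pyRange 0 ((l.length : Int) - 1) 1,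
      0 ≤ i ∧ i.toNat < (List.replicate l.length (0 : Int)).length := by
    intro i hi
    rw [PySem.List.mem_pyRange_one] at hi
    simp only [List.length_replicate]
    omega
  have hnd2 : (PySem.List.pyRange ((l.length : Int) - 1) 0 (-1)).Nodup := by
    rw [PySem.List.pyRange_neg_one_eq_reverse]
    exact List.nodup_reverse.mpr (PySem.List.nodup_pyRange_one _ _)
  have hb2 : ∀ i ∈ PySem.List.pyRange ((l.length : Int) - 1) 0 (-1), 0 ≤ i ∧ i.toNat <
      ((PySem.List.pyRange 0 ((l.length : Int) - 1) 1).foldl (fun arr i =>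
          if PySem.List.pyGetD l i ' ' = PySem.List.pyGetD l (i + 1) ' ' then arr
          else if PySem.Chars.lowerChar (PySem.List.pyGetD l i ' ')
                  = PySem.Chars.lowerChar (PySem.List.pyGetD l (i + 1) ' ') then
            arr.set i.toNat 1
          else arr)
        (List.replicate l.length (0 : Int))).length := by
    intro i hi
    rw [PySem.List.mem_pyRange_neg_one] at hi
    rw [hlen1]
    simp only [List.length_replicate]
    omega
  rw [fold_max_id]
  · rw [getD_fold_mark _ _ _ _ hnd2 hb2 j,
      getD_fold_mark _ _ _ _ (PySem.List.nodup_pyRange_one _ _) hb1 j]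
    have hrep : (List.replicate l.length (0 : Int)).getD j 0 = 0 := by
      simp [List.getD_eq_getElem?_getD, hj]
    rw [hrep]
    exact ite_ite_or _ _
  · intro i hi
    rw [PySem.List.mem_pyRange_one] at hi
    rw [length_fold_mark
      (fun i => PySem.List.pyGetD l i ' ' = PySem.List.pyGetD l (i - 1) ' ')
      (fun i => PySem.Chars.lowerChar (PySem.List.pyGetD l i ' ')
          = PySem.Chars.lowerChar (PySem.List.pyGetD l (i - 1) ' ')), hlen1]
    simp only [List.length_replicate]
    omega

theorem keep_step (P C1 C2 : Prop) [Decidable P] [Decidable C1] [Decidable C2]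
    (h : P ↔ (C1 ∨ C2)) (acc app : List Char) :
    (if (if P then (1 : Int) else 0) = 0 then acc ++ app else acc)
      = (if !(if C2 then true else if C1 then true else false) then acc ++ app else acc) := by
  by_cases hc1 : C1 <;> by_cases hc2 : C2 <;> simp [hc1, hc2, h]

theorem core (l : List Char) :
    (PySem.List.pyRange 0 ((l.length : Int)) 1).foldl (fun (t : List Char) i =>
        if PySem.List.pyGetD (tableA l) i 0 = 0 then t ++ [PySem.List.pyGetD l i ' '] else t) []
    = (PySem.List.pyRange 0 ((l.length : Int)) 1).foldl (fun (out : List Char) i =>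
        let c := PySem.List.pyGetD l i ' '
        let drop := [i - 1, i + 1].foldl (fun drop j =>
          if 0 ≤ j ∧ j < (l.length : Int) ∧ PySem.List.pyGetD l j ' ' ≠ c ∧
              PySem.Chars.lowerChar (PySem.List.pyGetD l j ' ') = PySem.Chars.lowerChar c then
            true
          else drop) false
        if !drop then out ++ [c] else out) [] := by
  apply PySem.List.foldl_congr_mem
  intro acc i hi
  rw [PySem.List.mem_pyRange_one] at hi
  have hcast : i = ((i.toNat : Nat) : Int) := by omega
  have hjlt : i.toNat < l.length := by omega
  rw [hcast, PySem.List.pyGetD_natCast (tableA l) i.toNat 0,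
    tableA_getD l i.toNat hjlt]
  simp only [List.foldl_cons, List.foldl_nil, ← hcast]
  apply keep_step
  simp only [PySem.List.mem_pyRange_neg_one, PySem.List.mem_pyRange_one]
  obtain ⟨hi0, hin⟩ := hi
  constructor
  · rintro (⟨⟨ha, hb⟩, hne, hlo⟩ | ⟨⟨ha, hb⟩, hne, hlo⟩)
    · exact Or.inl ⟨by omega, by omega, fun h => hne h.symm, hlo.symm⟩
    · exact Or.inr ⟨by omega, by omega, fun h => hne h.symm, hlo.symm⟩
  · rintro (⟨ha, hb, hne, hlo⟩ | ⟨ha, hb, hne, hlo⟩)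
    · exact Or.inl ⟨⟨by omega, by omega⟩, fun h => hne h.symm, hlo.symm⟩
    · exact Or.inr ⟨⟨by omega, by omega⟩, fun h => hne h.symm, hlo.symm⟩

-- ===== VERDICT =====
theorem f_spec : Claim_equal_f := by
  unfold Claim_equal_f Spec_f
  intro s _
  unfold f f_alt
  exact congrArg String.ofList (core s.toList)
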